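-- pv_equiv track=rewrite | github.com/samvv/Templaty | templaty/util.py | ends_with_newline
-- ===== SOURCE A (Python) =====
-- def ends_with_newline(text):
--     for ch in reversed(text):
--         if ch == '\n':
--             return True
--         if ch == ' ' or ch == '\t' or ch == '\r':
--             continue
--         break
--     return False
-- ===== SOURCE B (Python) =====
-- def ends_with_newline(text):
--     ok = False
--     for ch in text:
--         if ch == '\n':
--             ok = True
--         elif ch not in ' \t\r':
--             ok = False
--     return ok
-- ===== Notes on version B (the rewrite author's own statement) =====
-- stated objective: alternative
-- what changed: Replaces A's backward scan with early return/break by a single forward pass over the string keeping a boolean accumulator (set on newline, preserved on space/tab/CR, cleared otherwise).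
import Mathlib
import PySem

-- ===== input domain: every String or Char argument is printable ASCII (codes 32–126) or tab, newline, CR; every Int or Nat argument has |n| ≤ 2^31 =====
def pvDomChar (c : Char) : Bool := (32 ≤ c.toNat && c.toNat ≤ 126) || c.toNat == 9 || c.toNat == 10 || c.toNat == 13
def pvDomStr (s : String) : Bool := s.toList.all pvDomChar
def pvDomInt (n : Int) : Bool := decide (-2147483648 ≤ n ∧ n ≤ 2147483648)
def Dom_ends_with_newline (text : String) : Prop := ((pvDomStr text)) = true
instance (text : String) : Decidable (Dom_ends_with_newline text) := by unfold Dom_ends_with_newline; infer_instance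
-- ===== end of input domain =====

-- B replaces A's backward scan with break/early-return by a single forward pass with a boolean accumulator; same cost, different traversal.

-- ===== PORT A =====
-- the 'for ch in reversed(text)' loop, with its early returns and break
def ewnLoop : List Char → Bool
  | [] => false
  | ch :: rest =>
    if ch = '\n' then true
    else if ch = ' ' ∨ ch = '\t' ∨ ch = '\r' then ewnLoop rest
    else false

def ends_with_newline (text : String) : Bool :=
  ewnLoop text.toList.reverse

-- ===== PORT B =====
-- forward loop 'for ch in text' maintaining the boolean ok
def ewnStep (ok : Bool) (ch : Char) : Bool :=
  if ch = '\n' then true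
  else if [' ', '\t', '\r'].contains ch then ok
  else false

def ends_with_newline_alt (text : String) : Bool :=
  text.toList.foldl ewnStep false

-- ===== PRECONDITION & SPEC =====
def Spec_ends_with_newline (text : String) (out : Bool) : Prop := out = ends_with_newline_alt text
instance (text : String) (out : Bool) : Decidable (Spec_ends_with_newline text out) := by unfold Spec_ends_with_newline; infer_instance

-- ===== CLAIM =====
def Claim_equal_ends_with_newline : Prop := ∀ (text : String), Dom_ends_with_newline text → Spec_ends_with_newline text (ends_with_newline text)

-- ===== LEMMAS AND PROOFS =====

-- A's loop distributes over append: the tail is reached only when the head part is all skip chars.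
theorem ewnLoop_append (m n : List Char) :
    ewnLoop (m ++ n) =
      (ewnLoop m || (m.all (fun c => [' ', '\t', '\r'].contains c) && ewnLoop n)) := by
  induction m with
  | nil => simp [ewnLoop]
  | cons c m ih =>
    by_cases h : c = '\n'
    · subst h; simp [ewnLoop]
    · by_cases hw : c = ' ' ∨ c = '\t' ∨ c = '\r'
      · rcases hw with h1 | h1 | h1 <;> subst h1 <;>
          simp [ewnLoop, ih]
      · have h1 : c ≠ ' ' := fun e => hw (Or.inl e)
        have h2 : c ≠ '\t' := fun e => hw (Or.inr (Or.inl e))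
        have h3 : c ≠ '\r' := fun e => hw (Or.inr (Or.inr e))
        simp [ewnLoop, h, h1, h2, h3]

-- B's forward fold equals A's backward scan of the reverse, up to the accumulator on all-skip strings.
theorem foldl_eq_ewnLoop_reverse (l : List Char) (b : Bool) :
    l.foldl ewnStep b =
      (ewnLoop l.reverse || (b && l.all (fun c => [' ', '\t', '\r'].contains c))) := by
  induction l generalizing b with
  | nil => simp [ewnLoop]
  | cons c l ih =>
    rw [List.foldl_cons, ih, List.reverse_cons, ewnLoop_append]
    by_cases h : c = '\n'
    · subst h; simp [ewnLoop, ewnStep]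
    · by_cases hw : [' ', '\t', '\r'].contains c = true
      · have hm : c = ' ' ∨ c = '\t' ∨ c = '\r' := by simpa using hw
        simp only [ewnStep, if_neg h, if_pos hw]
        rcases hm with h1 | h1 | h1 <;> subst h1 <;>
          simp [ewnLoop, List.all_reverse]
      · have hne : c ≠ '\n' := h
        have h1 : c ≠ ' ' ∧ c ≠ '\t' ∧ c ≠ '\r' := by
          simp only [List.contains_cons, List.contains_nil, Bool.or_eq_true, beq_iff_eq] at hw
          push Not at hw
          exact ⟨hw.1, hw.2.1, hw.2.2.1⟩
        have hc : ewnLoop [c] = false := by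
          simp [ewnLoop, hne, h1.1, h1.2.1, h1.2.2]
        have hcf : [' ', '\t', '\r'].contains c = false := by
          simpa using hw
        simp only [ewnStep, if_neg h, hcf, Bool.false_and, if_neg (by simp : ¬ (false = true)),
          List.all_cons]
        simp [hc]

-- ===== VERDICT =====
theorem ends_with_newline_spec : Claim_equal_ends_with_newline := by
  intro text _
  unfold Spec_ends_with_newline ends_with_newline ends_with_newline_alt
  rw [foldl_eq_ewnLoop_reverse]
  simp
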